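-- pv_equiv track=rewrite | github.com/G-Guglielmo/Blinks-tracker | Functions.py | duration_blinks
-- ===== SOURCE A (Python) =====
-- def duration_blinks(listrand): # this function extracts the length of frames beloning to blinks and groups them, it is applied as double check after having controlled for the intervals (intervals_checker function)
--     count=1
--     consec_list=[]
--     durations = list()
--     for i in range(len(listrand[:-1])):
--         if listrand[i]+1 == listrand[i+1]:
--             count+=1
--         else:
--             consec_list.append(count)
--             count=1
--
--     # Account for the last iteration
--     consec_list.append(count)
--     for j in consec_list:
--         if j >= 2 and j <= 15: # range approx between 50 ms and 500 ms with 30 fps recording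
--             durations.append(j)
--
--     return durations
-- ===== SOURCE B (Python) =====
-- def duration_blinks(listrand):
--     # Boundary-index approach: find the cut positions between maximal runs of
--     # consecutive integers, take run lengths as differences of adjacent cuts,
--     # then keep the lengths in [2, 15].
--     n = len(listrand)
--     cuts = [0] + [i + 1 for i in range(n - 1) if listrand[i] + 1 != listrand[i + 1]] + [n]
--     return [d for d in map(lambda ab: ab[1] - ab[0], zip(cuts, cuts[1:])) if 2 <= d <= 15]
-- ===== Notes on version B (the rewrite author's own statement) =====
-- stated objective: alternative
-- what changed: A keeps a running counter flushed into consec_list at each break plus a trailing append; B instead computes the cut positions between maximal consecutive runs (zero, the break indices, n) and takes run lengths as differences of adjacent cuts, then keeps lengths between 2 and 15.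
import Mathlib
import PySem

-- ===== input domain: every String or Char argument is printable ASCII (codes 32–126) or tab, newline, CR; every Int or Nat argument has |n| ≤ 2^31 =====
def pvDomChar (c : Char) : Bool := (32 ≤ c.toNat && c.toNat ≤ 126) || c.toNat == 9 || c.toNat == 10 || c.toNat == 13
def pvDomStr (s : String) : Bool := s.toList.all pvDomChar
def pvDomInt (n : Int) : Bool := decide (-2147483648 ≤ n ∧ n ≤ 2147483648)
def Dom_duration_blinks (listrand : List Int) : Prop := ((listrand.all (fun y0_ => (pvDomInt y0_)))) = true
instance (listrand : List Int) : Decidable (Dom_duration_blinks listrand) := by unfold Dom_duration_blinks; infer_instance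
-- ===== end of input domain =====

-- B replaces A's running counter + flush-append with cut positions between runs and
-- differences of adjacent cuts (objective: alternative decomposition, same cost).

-- ===== PORT A =====
-- the body of A's first for-loop; indices i and i+1 are always in range
-- (i < len(listrand)-1), so getD with default 0 is exact for listrand[i] / listrand[i+1]
def pvStep (listrand : List Int) (st : Int × List Int) (i : Nat) : Int × List Int :=
  if listrand.getD i 0 + 1 = listrand.getD (i + 1) 0 then (st.1 + 1, st.2)
  else (1, st.2 ++ [st.1])

def duration_blinks (listrand : List Int) : List Int :=
  -- count=1; consec_list=[]; for i in range(len(listrand[:-1])): ...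
  let st := (List.range listrand.dropLast.length).foldl (pvStep listrand) (1, [])
  -- consec_list.append(count)  (account for the last iteration)
  let consec := st.2 ++ [st.1]
  -- second loop: durations keeps each j with 2 <= j <= 15
  consec.filter (fun j => decide (2 ≤ j) && decide (j ≤ 15))

-- ===== PORT B =====
-- cut positions after the leading 0: [i+1 for i in range(n-1) if break at i] + [n]
-- (indices i and i+1 are always in range, so getD with default 0 is exact)
def pvCutsTail (listrand : List Int) : List Int :=
  ((List.range (listrand.length - 1)).filter
      (fun i => !(listrand.getD i 0 + 1 == listrand.getD (i + 1) 0))).map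
    (fun (i : Nat) => (i : Int) + 1) ++ [(listrand.length : Int)]

-- cuts = [0] + ... + [n]
def pvCuts (listrand : List Int) : List Int := 0 :: pvCutsTail listrand

-- run lengths: map of a difference over zip(cuts, cuts[1:])
def pvDiffs (cs : List Int) : List Int := (cs.zip cs.tail).map (fun ab => ab.2 - ab.1)

def duration_blinks_alt (listrand : List Int) : List Int :=
  (pvDiffs (pvCuts listrand)).filter (fun d => decide (2 ≤ d) && decide (d ≤ 15))

-- ===== PRECONDITION & SPEC =====
def Spec_duration_blinks (listrand : List Int) (out : List Int) : Prop := out = duration_blinks_alt listrand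
instance (listrand : List Int) (out : List Int) : Decidable (Spec_duration_blinks listrand out) := by unfold Spec_duration_blinks; infer_instance

-- ===== CLAIM (what is proved, stated in full; the proofs are below) =====
def Claim_equal_duration_blinks : Prop := ∀ (listrand : List Int), Dom_duration_blinks listrand → Spec_duration_blinks listrand (duration_blinks listrand)

-- ===== LEMMAS AND PROOFS =====

-- common reference: the list of maximal-run lengths, with initial count c
def pvRuns : Int → List Int → List Int
  | c, [] => [c]
  | c, [_] => [c]
  | c, a :: b :: t => if a + 1 = b then pvRuns (c + 1) (b :: t) else c :: pvRuns 1 (b :: t)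

-- ---- A's loop computes pvRuns ----
lemma loopA : ∀ (l : List Int) (c : Int) (acc : List Int),
    (((List.range l.dropLast.length).foldl (pvStep l) (c, acc)).2)
      ++ [((List.range l.dropLast.length).foldl (pvStep l) (c, acc)).1]
    = acc ++ pvRuns c l := by
  intro l
  induction l with
  | nil => intro c acc; simp [pvRuns]
  | cons a t ih =>
    intro c acc
    cases t with
    | nil => simp [pvRuns]
    | cons b t =>
      have hlen : (a :: b :: t).dropLast.length = t.length + 1 := by
        simp [List.length_dropLast]
      rw [hlen, List.range_succ_eq_map, List.foldl_cons, List.foldl_map]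
      have hfun : (fun (st : Int × List Int) (i : Nat) => pvStep (a :: b :: t) st i.succ)
          = pvStep (b :: t) := by
        funext st i; simp [pvStep]
      have hlen' : (b :: t).dropLast.length = t.length := by
        simp [List.length_dropLast]
      by_cases h : a + 1 = b
      · have h0 : pvStep (a :: b :: t) (c, acc) 0 = (c + 1, acc) := by
          simp [pvStep, h]
        rw [h0, hfun, ← hlen', ih (c + 1) acc]
        simp [pvRuns, h]
      · have h0 : pvStep (a :: b :: t) (c, acc) 0 = (1, acc ++ [c]) := by
          simp [pvStep, h]
        rw [h0, hfun, ← hlen', ih 1 (acc ++ [c])]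
        simp [pvRuns, h]

lemma A_eq_runs (l : List Int) :
    duration_blinks l = (pvRuns 1 l).filter (fun j => decide (2 ≤ j) && decide (j ≤ 15)) := by
  have h := loopA l 1 []
  simp only [duration_blinks]
  rw [h]; simp

-- ---- B's diffs of cuts compute pvRuns (for nonempty input) ----
lemma pvDiffs_cons2 (x y : Int) (t : List Int) :
    pvDiffs (x :: y :: t) = (y - x) :: pvDiffs (y :: t) := by
  simp [pvDiffs]

lemma diffs_shift : ∀ ys : List Int, pvDiffs (ys.map (· + 1)) = pvDiffs ys := by
  intro ys
  induction ys with
  | nil => simp [pvDiffs]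
  | cons y ys ih =>
    cases ys with
    | nil => simp [pvDiffs]
    | cons z zs =>
      simp only [List.map_cons] at ih ⊢
      rw [pvDiffs_cons2, pvDiffs_cons2, ih]
      ring_nf

lemma filter_range_succ_shift (p : Nat → Bool) (n : Nat) :
    (List.range (n + 1)).filter p
      = (if p 0 then [0] else []) ++ ((List.range n).filter (fun i => p (i + 1))).map Nat.succ := by
  rw [List.range_succ_eq_map, List.filter_cons, List.filter_map]
  have h : (p ∘ Nat.succ) = (fun i => p (i + 1)) := by funext i; simp [Function.comp]
  by_cases h0 : p 0 = true <;> simp [h0, h]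

lemma cutsTail_cons (a b : Int) (t : List Int) :
    pvCutsTail (a :: b :: t)
      = (if a + 1 = b then [] else [1]) ++ (pvCutsTail (b :: t)).map (· + 1) := by
  have hshift := filter_range_succ_shift
      (fun i => !((a :: b :: t).getD i 0 + 1 == (a :: b :: t).getD (i + 1) 0)) t.length
  have hq' : (fun i => !((a :: b :: t).getD (i + 1) 0 + 1 == (a :: b :: t).getD (i + 1 + 1) 0))
      = (fun i => !((b :: t).getD i 0 + 1 == (b :: t).getD (i + 1) 0)) := by
    funext i; simp
  simp only [hq'] at hshift
  simp only [pvCutsTail, List.length_cons]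
  have h1 : t.length + 1 + 1 - 1 = t.length + 1 := rfl
  have h2 : t.length + 1 - 1 = t.length := rfl
  rw [h1, h2, hshift, List.map_append, List.map_map, List.map_append, List.map_map,
    List.append_assoc]
  congr 1
  by_cases h : a + 1 = b <;> simp [h]

-- add k to the first element (helper for run-length bookkeeping)
def pvBump (k : Int) : List Int → List Int
  | [] => []
  | h :: t => (h + k) :: t

lemma cutsTail_ne_nil (l : List Int) : pvCutsTail l ≠ [] := by
  simp [pvCutsTail]

lemma diffs_cuts_cons (a b : Int) (t : List Int) :
    pvDiffs (pvCuts (a :: b :: t))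
      = if a + 1 = b then pvBump 1 (pvDiffs (pvCuts (b :: t)))
        else 1 :: pvDiffs (pvCuts (b :: t)) := by
  rcases hz : pvCutsTail (b :: t) with _ | ⟨z, zs⟩
  · exact absurd hz (cutsTail_ne_nil (b :: t))
  rw [pvCuts, cutsTail_cons, hz]
  have hsh : pvDiffs ((z + 1) :: zs.map (· + 1)) = pvDiffs (z :: zs) := by
    simpa using diffs_shift (z :: zs)
  have hc : pvCuts (b :: t) = 0 :: z :: zs := by rw [pvCuts, hz]
  by_cases h : a + 1 = b
  · simp only [h, if_true, List.nil_append, List.map_cons]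
    rw [pvDiffs_cons2, hsh, hc, pvDiffs_cons2]
    simp only [pvBump]
    congr 1
    ring
  · simp only [h, if_false, List.cons_append, List.nil_append, List.map_cons]
    rw [pvDiffs_cons2, pvDiffs_cons2, hsh, hc, pvDiffs_cons2]
    norm_num

lemma runs_eq_bump_diffs : ∀ (l : List Int), l ≠ [] → ∀ (c : Int),
    pvRuns c l = pvBump (c - 1) (pvDiffs (pvCuts l)) := by
  intro l
  induction l with
  | nil => intro h; exact absurd rfl h
  | cons a t ih =>
    intro _ c
    cases t with
    | nil =>
      have : pvDiffs (pvCuts [a]) = [1] := by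
        simp [pvCuts, pvCutsTail, pvDiffs]
      simp [pvRuns, this, pvBump]
    | cons b t =>
      rw [diffs_cuts_cons]
      by_cases h : a + 1 = b
      · rw [if_pos h]
        have ihr := ih (by simp) (c + 1)
        simp only [pvRuns, if_pos h]
        rw [ihr]
        rcases pvDiffs (pvCuts (b :: t)) with _ | ⟨z, zs⟩
        · simp [pvBump]
        · simp [pvBump]
      · rw [if_neg h]
        have ihr := ih (by simp) 1
        simp only [pvRuns, if_neg h]
        rw [ihr]
        rcases pvDiffs (pvCuts (b :: t)) with _ | ⟨z, zs⟩
        · simp [pvBump]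
        · simp [pvBump]

-- ===== VERDICT (by name: the statement is the Claim_ definition above) =====
theorem duration_blinks_spec : Claim_equal_duration_blinks := by
  unfold Claim_equal_duration_blinks
  intro l _
  unfold Spec_duration_blinks
  cases l with
  | nil => decide
  | cons a t =>
    rw [A_eq_runs, duration_blinks_alt, runs_eq_bump_diffs (a :: t) (by simp) 1]
    rcases pvDiffs (pvCuts (a :: t)) with _ | ⟨z, zs⟩
    · simp [pvBump]
    · simp [pvBump]
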